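-- pv_equiv track=rewrite | github.com/sayeed205/manga | src/generators/manga_list.py | group_mangas_alphabetically
-- ===== SOURCE A (Python) =====
-- from collections import defaultdict
-- from typing import Dict, List, Tuple
--
-- def group_mangas_alphabetically(manga_list: List[Dict]) -> Dict[str, List[Dict]]:
--     """Group mangas by first letter of title.
--
--     Args:
--         manga_list: List of manga information dictionaries
--
--     Returns:
--         Dictionary mapping letters to lists of manga
--     """
--     grouped = defaultdict(list)
--
--     for manga in manga_list:
--         title = manga["title"]
--         # Get first character, handle special characters
--         first_char = title[0].upper() if title else "?"
--
--         # Group numbers and special characters under "#"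
--         if not first_char.isalpha():
--             first_char = "#"
--
--         grouped[first_char].append(manga)
--
--     # Sort each group by title
--     for group in grouped.values():
--         group.sort(key=lambda x: x["title"].lower())
--
--     return dict(grouped)
-- ===== SOURCE B (Python) =====
-- def group_mangas_alphabetically(manga_list):
--     """Group mangas by first letter of title: sort once, then group.
--
--     Sorts a copy of the whole list by lowercased title, then builds each
--     letter's bucket by a grouping pass over the already-sorted list, with
--     the returned dict's keys in first-appearance order of the input.
--     """
--     def first_letter(manga):
--         title = manga["title"]
--         c = title[0].upper() if title else "?"
--         return c if c.isalpha() else "#"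
--
--     ordered = sorted(manga_list, key=lambda m: m["title"].lower())
--     keys = dict.fromkeys(first_letter(m) for m in manga_list)
--     return {k: [m for m in ordered if first_letter(m) == k] for k in keys}
-- ===== Notes on version B (the rewrite author's own statement) =====
-- stated objective: alternative
-- what changed: A groups first with a defaultdict fold and then sorts each bucket separately; B sorts the whole list once by lowercased title and builds each bucket by a grouping pass over the already-sorted list, restoring first-appearance key order with dict.fromkeys.
import Mathlib
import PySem

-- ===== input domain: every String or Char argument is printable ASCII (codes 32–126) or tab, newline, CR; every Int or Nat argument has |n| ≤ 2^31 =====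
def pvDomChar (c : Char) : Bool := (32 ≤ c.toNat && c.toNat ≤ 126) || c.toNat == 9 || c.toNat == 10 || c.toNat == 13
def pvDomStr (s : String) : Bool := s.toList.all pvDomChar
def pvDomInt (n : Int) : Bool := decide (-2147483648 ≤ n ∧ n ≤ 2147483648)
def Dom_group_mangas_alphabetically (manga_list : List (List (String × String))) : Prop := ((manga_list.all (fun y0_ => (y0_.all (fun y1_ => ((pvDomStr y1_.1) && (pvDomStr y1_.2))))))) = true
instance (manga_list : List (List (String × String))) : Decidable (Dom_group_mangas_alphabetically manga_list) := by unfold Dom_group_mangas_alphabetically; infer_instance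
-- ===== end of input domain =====

-- ===== PORT A =====
-- Port of A: one fold building a defaultdict(list) of groups in first-appearance
-- key order, then each group sorted by lowercased title.
-- manga["title"]: Pre_ excludes the KeyError inputs, so the "" default is never read.
def pvTitle (m : List (String × String)) : String :=
  PySem.Dict.getD (PySem.Dict.mk m) "title" ""

def group_mangas_alphabetically (manga_list : List (List (String × String))) : List (String × List (List (String × String))) :=
  let grouped := manga_list.foldl (fun d manga =>
    let title := pvTitle manga
    let fc : Char := match title.toList with
      | [] => '?'
      | c :: _ => PySem.Chars.upperChar c
    let first_char : String := if PySem.Chars.isalpha fc then String.ofList [fc] else "#"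
    d.insert first_char (d.getD first_char [] ++ [manga])) PySem.Dict.empty
  grouped.items.map (fun kv =>
    (kv.1, PySem.List.sorted kv.2 (fun x => PySem.Str.lower (pvTitle x)) false))

-- ===== PORT B =====
-- Port of B: sort the whole list once by lowercased title, then build each
-- bucket by filtering the sorted list, keys in first-appearance order.
def pvFirstLetter (m : List (String × String)) : String :=
  let fc : Char := match (pvTitle m).toList with
    | [] => '?'
    | c :: _ => PySem.Chars.upperChar c
  if PySem.Chars.isalpha fc then String.ofList [fc] else "#"

def group_mangas_alphabetically_alt (manga_list : List (List (String × String))) : List (String × List (List (String × String))) :=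
  let ordered := PySem.List.sorted manga_list (fun m => PySem.Str.lower (pvTitle m)) false
  (PySem.List.dedup (manga_list.map pvFirstLetter)).map
    (fun k => (k, ordered.filter (fun m => pvFirstLetter m == k)))

-- ===== PRECONDITION & SPEC =====
-- Pre_ excludes exactly the mangas without a "title" key, on which Python A raises KeyError.
def Pre_group_mangas_alphabetically (manga_list : List (List (String × String))) : Prop :=
  ∀ m ∈ manga_list, "title" ∈ m.map Prod.fst
instance (manga_list : List (List (String × String))) : Decidable (Pre_group_mangas_alphabetically manga_list) := by unfold Pre_group_mangas_alphabetically; infer_instance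
def pvWitness_group_mangas_alphabetically : (List (List (String × String))) :=
  ([[("title", "Naruto")], [("title", "berserk")], [("title", "")], [("title", "3x3 Eyes")]])
def Spec_group_mangas_alphabetically (manga_list : List (List (String × String))) (out : List (String × List (List (String × String)))) : Prop := out = group_mangas_alphabetically_alt manga_list
instance (manga_list : List (List (String × String))) (out : List (String × List (List (String × String)))) : Decidable (Spec_group_mangas_alphabetically manga_list out) := by unfold Spec_group_mangas_alphabetically; infer_instance

-- ===== CLAIM (what is proved, stated in full; the proofs are below) =====
def Claim_equal_group_mangas_alphabetically : Prop := ∀ (manga_list : List (List (String × String))), Dom_group_mangas_alphabetically manga_list → Pre_group_mangas_alphabetically manga_list → Spec_group_mangas_alphabetically manga_list (group_mangas_alphabetically manga_list)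

-- ===== LEMMAS AND PROOFS =====

-- insertBy puts x in front when it sorts before everything in the list
theorem pv_insertBy_head {a : Type} (before : a -> a -> Bool) (x : a) (zs : List a)
    (h : ∀ z ∈ zs, before x z = true) :
    PySem.List.insertBy before x zs = x :: zs := by
  cases zs with
  | nil => rfl
  | cons z zs => simp [PySem.List.insertBy, h z (by simp)]

-- filter drops x: filtering commutes with dropping it from an insertion
theorem pv_filter_insertBy_neg {a : Type} (before : a -> a -> Bool) (p : a -> Bool) (x : a)
    (ys : List a) (hx : p x = false) :
    (PySem.List.insertBy before x ys).filter p = ys.filter p := by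
  induction ys with
  | nil => simp [PySem.List.insertBy, hx]
  | cons y ys ih =>
    simp only [PySem.List.insertBy]
    split
    · simp [hx]
    · by_cases hy : p y = true <;> simp [hy, ih]

-- filter keeps x: on a key-sorted list, filtering commutes with insertion
theorem pv_filter_insertBy_pos {a k : Type} [LinearOrder k] (key : a -> k) (p : a -> Bool) (x : a)
    (ys : List a) (hx : p x = true)
    (hs : ys.Pairwise (fun u v => key u <= key v)) :
    (PySem.List.insertBy (fun u v => decide (key u < key v)) x ys).filter p
      = PySem.List.insertBy (fun u v => decide (key u < key v)) x (ys.filter p) := by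
  induction ys with
  | nil => simp [PySem.List.insertBy, hx]
  | cons y ys ih =>
    rcases List.pairwise_cons.mp hs with ⟨hy, hs'⟩
    simp only [PySem.List.insertBy]
    split
    · rename_i hlt
      by_cases hpy : p y = true
      · simp [hx, hpy, PySem.List.insertBy, hlt]
      · simp only [List.filter_cons, hx, hpy, if_pos, Bool.false_eq_true, if_false]
        rw [pv_insertBy_head]
        intro z hz
        have hzm : z ∈ ys := List.mem_of_mem_filter hz
        have : key x < key z := lt_of_lt_of_le (of_decide_eq_true hlt) (hy z hzm)
        simpa using this
    · rename_i hnlt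
      by_cases hpy : p y = true
      · simp only [List.filter_cons, hpy, if_true, ih hs']
        simp [PySem.List.insertBy, hnlt]
      · simp [hpy, ih hs']

-- filtering a stably sorted list = stably sorting the filtered list
theorem pv_filter_sorted {a k : Type} [LinearOrder k] (key : a -> k) (p : a -> Bool)
    (xs : List a) :
    (PySem.List.sorted xs key false).filter p = PySem.List.sorted (xs.filter p) key false := by
  induction xs using List.reverseRecOn with
  | nil => rfl
  | append_singleton xs x ih =>
    rw [PySem.List.sorted_eq_foldl_insertBy, List.foldl_append,
        <- PySem.List.sorted_eq_foldl_insertBy]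
    simp only [List.foldl_cons, List.foldl_nil]
    by_cases hx : p x = true
    · rw [pv_filter_insertBy_pos key p x _ hx (PySem.List.sorted_pairwise xs key), ih,
          List.filter_append]
      simp only [List.filter_cons, hx, if_true, List.filter_nil]
      rw [PySem.List.sorted_eq_foldl_insertBy (xs.filter p ++ [x]), List.foldl_append,
          <- PySem.List.sorted_eq_foldl_insertBy]
      rfl
    · rw [pv_filter_insertBy_neg _ p x _ (by simpa using hx), ih, List.filter_append]
      simp [hx]

-- the items of A's grouping dict after processing `seen`
def pvGroupItems (f : List (String × String) -> String) (seen : List (List (String × String))) :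
    List (String × List (List (String × String))) :=
  (PySem.List.dedup (seen.map f)).map (fun kk => (kk, seen.filter (fun m => f m == kk)))

theorem pv_find_map_some {b : Type} (ks : List String) (k0 : String) (g : String -> b)
    (h : k0 ∈ ks) :
    (ks.map (fun kk => (kk, g kk))).find? (fun pr => pr.1 == k0) = some (k0, g k0) := by
  induction ks with
  | nil => cases h
  | cons k ks ih =>
    by_cases hk : k = k0
    · subst hk; simp
    · simp only [List.map_cons, List.find?]
      have : (k == k0) = false := by simpa using hk
      simp only [this]
      refine ih ?_
      rcases List.mem_cons.mp h with h' | h'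
      · exact absurd h'.symm hk
      · exact h'

theorem pv_find_map_none {b : Type} (ks : List String) (k0 : String) (g : String -> b)
    (h : k0 ∉ ks) :
    (ks.map (fun kk => (kk, g kk))).find? (fun pr => pr.1 == k0) = none := by
  induction ks with
  | nil => rfl
  | cons k ks ih =>
    simp only [List.map_cons, List.find?_cons]
    have hk : (k == k0) = false := by simp; rintro rfl; exact h (by simp)
    simp only [hk]
    exact ih (fun hm => h (by simp [hm]))

theorem pv_dedup_append_singleton {a : Type} [BEq a] (xs : List a) (x : a) :
    PySem.List.dedup (xs ++ [x])
      = if (PySem.List.dedup xs).contains x then PySem.List.dedup xs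
        else PySem.List.dedup xs ++ [x] := by
  simp only [PySem.List.dedup, PySem.Set.ofList, List.foldl_append, List.foldl_cons,
    List.foldl_nil]
  rfl

-- one fold step of A turns the group table for `seen` into the table for `seen ++ [m]`
theorem pv_group_step (f : List (String × String) -> String)
    (seen : List (List (String × String))) (m : List (String × String)) :
    ((PySem.Dict.mk (pvGroupItems f seen)).insert (f m)
        ((PySem.Dict.mk (pvGroupItems f seen)).getD (f m) [] ++ [m]))
      = PySem.Dict.mk (pvGroupItems f (seen ++ [m])) := by
  have hmap : (seen ++ [m]).map f = seen.map f ++ [f m] := by simp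
  by_cases hk : f m ∈ PySem.List.dedup (seen.map f)
  · -- the letter was seen before: the pair with that key is overwritten in place
    have hc : (PySem.Dict.mk (pvGroupItems f seen)).contains (f m) = true := by
      simp only [PySem.Dict.contains, pvGroupItems, List.any_map,
        List.any_eq_true, Function.comp]
      exact ⟨f m, hk, by simp⟩
    have hg : (PySem.Dict.mk (pvGroupItems f seen)).getD (f m) []
        = seen.filter (fun m' => f m' == f m) := by
      simp only [PySem.Dict.getD, PySem.Dict.get?, pvGroupItems,
        pv_find_map_some _ _ _ hk, Option.map_some, Option.getD_some]
    have hks : PySem.List.dedup ((seen ++ [m]).map f) = PySem.List.dedup (seen.map f) := by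
      rw [hmap, pv_dedup_append_singleton, if_pos (by simpa using hk)]
    simp only [PySem.Dict.insert, hc, if_pos, hg]
    refine congrArg PySem.Dict.mk ?_
    unfold pvGroupItems
    rw [hks, List.map_map]
    apply List.map_congr_left
    intro k _
    simp only [Function.comp]
    by_cases hkk : k = f m
    · subst hkk; simp [List.filter_append]
    · have h1 : (k == f m) = false := by simpa using hkk
      have h2 : (f m == k) = false := by simp; exact fun e => hkk e.symm
      simp [h1, List.filter_append, h2]
  · -- a new letter: its pair is appended at the end
    have hc : (PySem.Dict.mk (pvGroupItems f seen)).contains (f m) = false := by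
      simp only [PySem.Dict.contains, pvGroupItems, List.any_map,
        List.any_eq_false, Function.comp]
      intro k hkm
      have hne : k ≠ f m := fun e => hk (by rwa [e] at hkm)
      simpa using hne
    have hg : (PySem.Dict.mk (pvGroupItems f seen)).getD (f m) [] = [] := by
      simp only [PySem.Dict.getD, PySem.Dict.get?, pvGroupItems,
        pv_find_map_none _ _ _ hk, Option.map_none, Option.getD_none]
    have hnm : f m ∉ seen.map f := fun hmem => hk ((PySem.List.mem_dedup _ _).mpr hmem)
    have hks : PySem.List.dedup ((seen ++ [m]).map f)
        = PySem.List.dedup (seen.map f) ++ [f m] := by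
      rw [hmap, pv_dedup_append_singleton, if_neg (by simpa using hk)]
    simp only [PySem.Dict.insert, hc, Bool.false_eq_true, if_false, hg]
    refine congrArg PySem.Dict.mk ?_
    unfold pvGroupItems
    rw [hks, List.map_append, List.map_cons, List.map_nil]
    refine congrArg₂ (· ++ ·) ?_ ?_
    · apply List.map_congr_left
      intro k hkm
      have hne : k ≠ f m := fun e => hk (e ▸ hkm)
      have h2 : (f m == k) = false := by simp; exact fun e => hne e.symm
      simp [List.filter_append, h2]
    · have hfe : seen.filter (fun m' => f m' == f m) = [] := by
        rw [List.filter_eq_nil_iff]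
        intro a ha
        simp only [beq_eq_false_iff_ne, ne_eq, Bool.not_eq_true, beq_eq_false_iff_ne]
        exact fun e => hnm (e ▸ List.mem_map_of_mem ha)
      simp [List.filter_append, hfe]

theorem pv_group_fold (f : List (String × String) -> String)
    (xs : List (List (String × String))) :
    xs.foldl (fun d manga => d.insert (f manga) (d.getD (f manga) [] ++ [manga]))
        PySem.Dict.empty
      = PySem.Dict.mk (pvGroupItems f xs) := by
  induction xs using List.reverseRecOn with
  | nil => rfl
  | append_singleton xs x ih => rw [List.foldl_append, List.foldl_cons, List.foldl_nil, ih,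
      pv_group_step]

-- ===== VERDICT (by name: the statement is the Claim_ definition above) =====
theorem group_mangas_alphabetically_spec : Claim_equal_group_mangas_alphabetically := by
  intro manga_list _ _
  unfold Spec_group_mangas_alphabetically group_mangas_alphabetically group_mangas_alphabetically_alt
  rw [show (fun (d : PySem.Dict String (List (List (String × String)))) manga =>
        let title := pvTitle manga
        let fc : Char := match title.toList with
          | [] => '?'
          | c :: _ => PySem.Chars.upperChar c
        let first_char : String := if PySem.Chars.isalpha fc then String.ofList [fc] else "#"
        d.insert first_char (d.getD first_char [] ++ [manga]))
      = (fun d manga => d.insert (pvFirstLetter manga)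
          (d.getD (pvFirstLetter manga) [] ++ [manga])) from rfl]
  rw [pv_group_fold pvFirstLetter manga_list]
  show (pvGroupItems pvFirstLetter manga_list).map _ = _
  unfold pvGroupItems
  rw [List.map_map]
  apply List.map_congr_left
  intro k hk
  simp only [Function.comp]
  rw [pv_filter_sorted]
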